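-- pv_equiv track=rewrite | github.com/momentive-pih/Backend_function_app | shared_code/helper.py | replace_character_for_querying
-- ===== SOURCE A (Python) =====
-- def replace_character_for_querying(value_list):
--     try:
--         replace={" ":"\ ","/":"\/","*":"\*","(":"\(",")":"\)",":":"\:","[":"\[","]":"\]"}
--         replaced_list=[data.translate(str.maketrans(replace)) for data in value_list if (data!=None and str(data)!='-')]
--         replaced_query=" || ".join(replaced_list)
--         return replaced_query
--     except Exception as e:
--         pass
-- ===== SOURCE B (Python) =====
-- def replace_character_for_querying(value_list):
--     try:
--         parts = [data for data in value_list if data != None and str(data) != '-']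
--         for ch in ' /*():[]':
--             parts = [p.replace(ch, '\\' + ch) for p in parts]
--         return ' || '.join(parts)
--     except Exception:
--         pass
-- ===== Notes on version B (the rewrite author's own statement) =====
-- stated objective: alternative
-- what changed: Replaces A's single-pass str.translate/maketrans table substitution with staged passes: filter the kept strings once, then run one str.replace pass per special character over the whole list, then join.
import Mathlib
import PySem

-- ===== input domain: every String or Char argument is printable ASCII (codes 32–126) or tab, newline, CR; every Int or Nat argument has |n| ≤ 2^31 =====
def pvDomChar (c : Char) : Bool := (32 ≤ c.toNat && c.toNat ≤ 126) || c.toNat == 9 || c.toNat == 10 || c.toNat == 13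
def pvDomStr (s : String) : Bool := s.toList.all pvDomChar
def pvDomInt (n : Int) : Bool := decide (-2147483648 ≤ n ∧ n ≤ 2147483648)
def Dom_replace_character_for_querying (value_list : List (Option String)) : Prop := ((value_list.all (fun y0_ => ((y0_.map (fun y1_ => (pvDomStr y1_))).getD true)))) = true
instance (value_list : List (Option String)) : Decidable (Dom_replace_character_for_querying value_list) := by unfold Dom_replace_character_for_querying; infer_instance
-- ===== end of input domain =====

-- B replaces A's single-pass str.translate table substitution by staged passes: one str.replace pass per special character over the kept list, then join (alternative decomposition, same cost).


-- ===== PORT A =====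
def pvTransMap : PySem.Dict Char String :=
  PySem.Dict.ofList [(' ', "\\ "), ('/', "\\/"), ('*', "\\*"), ('(', "\\("), (')', "\\)"), (':', "\\:"), ('[', "\\["), (']', "\\]")]

-- str.translate: each char replaced by its table entry (a string), others kept
def pvTranslate (s : String) : String :=
  String.ofList (s.toList.foldl (fun acc c => acc ++ (PySem.Dict.getD pvTransMap c (String.ofList [c])).toList) [])

def replace_character_for_querying (value_list : List (Option String)) : String :=
  PySem.Str.join " || " (value_list.filterMap (fun data =>
    match data with
    | none => none
    | some s => if s = "-" then none else some (pvTranslate s)))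

-- ===== PORT B =====
-- the pass characters, in the order Source B iterates over ' /*():[]'
def pvSpecialsB : List Char := [' ', '/', '*', '(', ')', ':', '[', ']']

def replace_character_for_querying_alt (value_list : List (Option String)) : String :=
  let parts := value_list.filterMap (fun data =>
    match data with
    | none => none
    | some s => if s = "-" then none else some s)
  let parts := pvSpecialsB.foldl
    (fun ps ch => ps.map (fun p => PySem.Str.replace p (String.ofList [ch]) (String.ofList ['\\', ch]))) parts
  PySem.Str.join " || " parts

-- ===== PRECONDITION & SPEC =====
def Spec_replace_character_for_querying (value_list : List (Option String)) (out : String) : Prop := out = replace_character_for_querying_alt value_list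
instance (value_list : List (Option String)) (out : String) : Decidable (Spec_replace_character_for_querying value_list out) := by unfold Spec_replace_character_for_querying; infer_instance

-- ===== CLAIM (what is proved, stated in full; the proofs are below) =====
def Claim_equal_replace_character_for_querying : Prop := ∀ (value_list : List (Option String)), Dom_replace_character_for_querying value_list → Spec_replace_character_for_querying value_list (replace_character_for_querying value_list)

-- ===== LEMMAS AND PROOFS =====

lemma pv_go (c : Char) (new : List Char) (fuel : Nat) (l acc : List Char) (h : l.length ≤ fuel) :
    PySem.Chars.replace.go [c] new fuel l acc = acc.reverse ++ l.flatMap (fun x => if x = c then new else [x]) := by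
  induction l generalizing fuel acc with
  | nil => cases fuel <;> simp [PySem.Chars.replace.go]
  | cons x t ih =>
    cases fuel with
    | zero => simp at h
    | succ n =>
      rw [PySem.Chars.replace.go]
      by_cases hx : x = c
      · subst hx
        simp only [List.isPrefixOf, beq_self_eq_true, Bool.true_and, if_true,
          List.length_cons, List.length_nil, List.drop_succ_cons, List.drop_zero]
        rw [ih _ _ (by simpa using Nat.le_of_succ_le_succ h)]
        simp
      · have : ([c].isPrefixOf (x :: t)) = false := by
          simp [List.isPrefixOf, Ne.symm hx]
        rw [this]
        simp only [Bool.false_eq_true, if_false]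
        rw [ih _ _ (Nat.le_of_succ_le_succ h)]
        simp [hx]

lemma pv_replace_single (c : Char) (new l : List Char) :
    PySem.Chars.replace l [c] new = l.flatMap (fun x => if x = c then new else [x]) := by
  rw [PySem.Chars.replace]
  simp only [List.isEmpty_cons, Bool.false_eq_true, if_false]
  simpa using pv_go c new l.length l [] le_rfl

lemma pv_passes (cs : List Char) (hb : '\\' ∉ cs) (hd : cs.Nodup) (l : List Char) :
    cs.foldl (fun acc c => acc.flatMap (fun x => if x = c then ['\\', c] else [x])) l
      = l.flatMap (fun x => if x ∈ cs then ['\\', x] else [x]) := by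
  induction cs generalizing l with
  | nil => simp
  | cons c cs ih =>
    simp only [List.foldl_cons]
    rw [ih (fun h => hb (List.mem_cons_of_mem _ h)) hd.of_cons, List.flatMap_assoc]
    apply List.flatMap_congr  -- hope exists
    intro x _
    by_cases hx : x = c
    · subst hx
      have hbc : '\\' ∉ cs := fun h => hb (List.mem_cons_of_mem _ h)
      have hcc : x ∉ cs := (List.nodup_cons.mp hd).1
      simp [hbc, hcc]
    · simp [hx]

lemma pv_entry (c : Char) :
    (PySem.Dict.getD pvTransMap c (String.ofList [c])).toList
      = (if c ∈ pvSpecialsB then ['\\', c] else [c]) := by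
  by_cases h : c ∈ pvSpecialsB
  · rw [if_pos h]
    simp only [pvSpecialsB, List.mem_cons, List.not_mem_nil, or_false] at h
    rcases h with h|h|h|h|h|h|h|h <;> subst h <;> rfl
  · rw [if_neg h]
    simp only [pvSpecialsB, List.mem_cons, List.not_mem_nil, or_false, not_or] at h
    obtain ⟨h1,h2,h3,h4,h5,h6,h7,h8⟩ := h
    have hm : pvTransMap = PySem.Dict.mk [(' ', "\\ "), ('/', "\\/"), ('*', "\\*"), ('(', "\\("),
        (')', "\\)"), (':', "\\:"), ('[', "\\["), (']', "\\]")] := rfl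
    rw [hm]
    simp [PySem.Dict.getD_eq_get?_getD, Ne.symm h1, Ne.symm h2,
      Ne.symm h3, Ne.symm h4, Ne.symm h5, Ne.symm h6, Ne.symm h7, Ne.symm h8, PySem.Dict.get?]

lemma pv_translate_eq (s : String) :
    pvTranslate s = String.ofList (s.toList.flatMap (fun x => if x ∈ pvSpecialsB then ['\\', x] else [x])) := by
  unfold pvTranslate
  congr 1
  rw [PySem.List.foldl_append_eq_flatMap]
  exact List.flatMap_congr (fun c _ => pv_entry c)

lemma pv_map_foldl (cs : List Char) (ps : List String) :
    cs.foldl (fun ps ch => ps.map (fun p => PySem.Str.replace p (String.ofList [ch]) (String.ofList ['\\', ch]))) ps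
      = ps.map (fun p => cs.foldl (fun p ch => PySem.Str.replace p (String.ofList [ch]) (String.ofList ['\\', ch])) p) := by
  induction cs generalizing ps with
  | nil => simp
  | cons c cs ih => simp [ih, List.map_map, Function.comp_def]

lemma pv_str_passes (s : String) :
    pvSpecialsB.foldl (fun p ch => PySem.Str.replace p (String.ofList [ch]) (String.ofList ['\\', ch])) s
      = pvTranslate s := by
  have key : ∀ (cs : List Char) (s : String), '\\' ∉ cs →
      cs.foldl (fun p ch => PySem.Str.replace p (String.ofList [ch]) (String.ofList ['\\', ch])) s
        = String.ofList (cs.foldl (fun acc c => acc.flatMap (fun x => if x = c then ['\\', c] else [x])) s.toList) := by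
    intro cs
    induction cs with
    | nil => intro s _; simp
    | cons c cs ih =>
      intro s hb
      simp only [List.foldl_cons]
      rw [ih _ (fun h => hb (List.mem_cons_of_mem _ h))]
      congr 1
      rw [PySem.Str.replace]
      simp [String.toList_ofList, pv_replace_single]
  rw [key _ _ (by decide), pv_passes _ (by decide) (by decide), pv_translate_eq]


-- ===== VERDICT (by name: the statement is the Claim_ definition above) =====
theorem replace_character_for_querying_spec : Claim_equal_replace_character_for_querying := by
  intro value_list _
  unfold Spec_replace_character_for_querying replace_character_for_querying replace_character_for_querying_alt
  simp only [pv_map_foldl, List.map_filterMap]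
  congr 1
  apply List.filterMap_congr
  intro d _
  cases d with
  | none => rfl
  | some s =>
    by_cases hs : s = "-" <;> simp [hs, pv_str_passes]
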